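-- pv_equiv track=rewrite | github.com/archerverified/emailverifier | backend/csv_utils.py | _count_delimiter_outside_quotes
-- ===== SOURCE A (Python) =====
-- def _count_delimiter_outside_quotes(line: str, delim: str) -> int:
--     """Count delimiter occurrences outside of quoted strings."""
--     count = 0
--     in_quotes = False
--     quote_char = None
--
--     for char in line:
--         if char in ('"', "'") and not in_quotes:
--             in_quotes = True
--             quote_char = char
--         elif char == quote_char and in_quotes:
--             in_quotes = False
--             quote_char = None
--         elif char == delim and not in_quotes:
--             count += 1
--
--     return count
-- ===== SOURCE B (Python) =====
-- def _count_delimiter_outside_quotes(line: str, delim: str) -> int: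
--     """Count delimiter occurrences outside of quoted strings.
--
--     Build-then-count: jump past each quoted run (an unterminated quote
--     swallows the rest of the line), collect the unquoted characters, then
--     count those equal to the delimiter.
--     """
--     stripped = []
--     i = 0
--     n = len(line)
--     while i < n:
--         c = line[i]
--         if c in '"\'':
--             j = line.find(c, i + 1)
--             i = n if j < 0 else j + 1
--         else:
--             stripped.append(c)
--             i += 1
--     return sum(1 for c in stripped if c == delim)
-- ===== Notes on version B (the rewrite author's own statement) =====
-- stated objective: alternative
-- what changed: Replaced A's per-character in_quotes/quote_char state machine with a build-then-count decomposition: an index scan that jumps past each quoted run via str.find (unterminated quotes swallow the rest), collects the unquoted characters, and then counts those equal to the delimiter.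
import Mathlib
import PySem

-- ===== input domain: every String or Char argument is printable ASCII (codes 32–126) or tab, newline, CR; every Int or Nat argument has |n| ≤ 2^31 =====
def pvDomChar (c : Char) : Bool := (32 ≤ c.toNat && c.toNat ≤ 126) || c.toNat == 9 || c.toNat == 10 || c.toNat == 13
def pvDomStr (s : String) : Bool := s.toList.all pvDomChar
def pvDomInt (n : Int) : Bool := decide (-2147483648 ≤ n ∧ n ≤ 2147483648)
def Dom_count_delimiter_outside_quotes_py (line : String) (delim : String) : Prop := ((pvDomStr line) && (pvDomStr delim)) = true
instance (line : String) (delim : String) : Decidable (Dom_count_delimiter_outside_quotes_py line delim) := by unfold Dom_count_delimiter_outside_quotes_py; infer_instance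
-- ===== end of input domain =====

-- B replaces A's incremental in_quotes/quote_char state machine with a build-then-count
-- decomposition (jump past quoted runs, then count the remaining delimiter characters);
-- objective: alternative (same cost, different algorithmic decomposition).

-- ===== PORT A =====
-- the for-loop over the characters with state (count, in_quotes, quote_char)
def cdLoopA (delim : String) : List Char → Int → Bool → Option Char → Int
  | [], count, _, _ => count
  | c :: rest, count, inq, qc =>
    if (c == '"' || c == '\'') && !inq then cdLoopA delim rest count true (some c)
    else if (some c == qc) && inq then cdLoopA delim rest count false none
    else if (String.mk [c] == delim) && !inq then cdLoopA delim rest (count + 1) inq qc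
    else cdLoopA delim rest count inq qc

def count_delimiter_outside_quotes_py (line : String) (delim : String) : Int :=
  cdLoopA delim line.toList 0 false none

-- ===== PORT B =====
-- mirrors `line.find(c, i+1)`: drop up to and including the next matching quote (or to end)
def cdDropAfterQuote (q : Char) : List Char → List Char
  | [] => []
  | c :: rest => if c == q then rest else cdDropAfterQuote q rest

theorem cdDropAfterQuote_length (q : Char) (l : List Char) :
    (cdDropAfterQuote q l).length ≤ l.length := by
  induction l with
  | nil => simp [cdDropAfterQuote]
  | cons c rest ih =>
    simp only [cdDropAfterQuote]
    split
    · simp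
    · exact le_trans ih (by simp)

-- mirrors B's while loop building `stripped`
def cdStripQuoted : List Char → List Char
  | [] => []
  | c :: rest =>
    if c == '"' || c == '\'' then cdStripQuoted (cdDropAfterQuote c rest)
    else c :: cdStripQuoted rest
termination_by l => l.length
decreasing_by
  · have := cdDropAfterQuote_length c rest; simp; omega
  · simp

def count_delimiter_outside_quotes_py_alt (line : String) (delim : String) : Int :=
  ((cdStripQuoted line.toList).countP (fun c => String.mk [c] == delim) : Int)

-- ===== PRECONDITION & SPEC =====
def Spec_count_delimiter_outside_quotes_py (line : String) (delim : String) (out : Int) : Prop := out = count_delimiter_outside_quotes_py_alt line delim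
instance (line : String) (delim : String) (out : Int) : Decidable (Spec_count_delimiter_outside_quotes_py line delim out) := by unfold Spec_count_delimiter_outside_quotes_py; infer_instance

-- ===== CLAIM (what is proved, stated in full; the proofs are below) =====
def Claim_equal_count_delimiter_outside_quotes_py : Prop := ∀ (line : String) (delim : String), Dom_count_delimiter_outside_quotes_py line delim → Spec_count_delimiter_outside_quotes_py line delim (count_delimiter_outside_quotes_py line delim)

-- ===== LEMMAS AND PROOFS =====
-- main invariant: A's state machine equals count-after-strip, in both quote states
theorem cdLoopA_strip (delim : String) :
    ∀ n (l : List Char), l.length ≤ n →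
      (∀ (count : Int) (qc : Option Char),
        cdLoopA delim l count false qc =
          count + ((cdStripQuoted l).countP (fun c => String.mk [c] == delim) : Int)) ∧
      (∀ (count : Int) (q : Char),
        cdLoopA delim l count true (some q) =
          count + ((cdStripQuoted (cdDropAfterQuote q l)).countP (fun c => String.mk [c] == delim) : Int)) := by
  intro n
  induction n with
  | zero =>
    intro l hl
    have : l = [] := List.eq_nil_of_length_eq_zero (Nat.le_zero.mp hl)
    subst this
    constructor <;> intro count _ <;> simp [cdLoopA, cdStripQuoted, cdDropAfterQuote]
  | succ m ih =>
    intro l hl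
    cases l with
    | nil => constructor <;> intro count _ <;> simp [cdLoopA, cdStripQuoted, cdDropAfterQuote]
    | cons c rest =>
      have hr : rest.length ≤ m := by simpa using Nat.lt_succ_iff.mp (Nat.lt_of_lt_of_le (by simp) hl)
      have hd : ∀ q : Char, (cdDropAfterQuote q rest).length ≤ m :=
        fun q => le_trans (cdDropAfterQuote_length q rest) hr
      constructor
      · intro count qc
        by_cases hq : (c == '"' || c == '\'') = true
        · -- opens a quote
          have h2 := (ih rest hr).2
          simp only [cdLoopA, hq, Bool.not_false, Bool.and_true, if_pos rfl]
          rw [h2 count c]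
          simp [cdStripQuoted, hq]
        · have hq' : (c == '"' || c == '\'') = false := by simpa using hq
          by_cases hdm : (String.mk [c] == delim) = true
          · simp only [cdLoopA, hq', Bool.false_and, Bool.false_eq_true, if_false,
              Bool.and_false, Bool.not_false, hdm, Bool.true_and, Bool.and_true, if_true]
            rw [((ih rest hr).1) (count + 1) qc]
            simp [cdStripQuoted, hq', hdm]
            ring
          · have hdm' : (String.mk [c] == delim) = false := by simpa using hdm
            simp only [cdLoopA, hq', Bool.false_and, Bool.false_eq_true, if_false,
              Bool.and_false, hdm', Bool.and_true]
            rw [((ih rest hr).1) count qc]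
            simp [cdStripQuoted, hq', hdm']
      · intro count q
        by_cases hcq : (c == q) = true
        · simp only [cdLoopA, Bool.not_true, Bool.and_false, Bool.false_eq_true, if_false,
            Bool.and_true, hcq]
          rw [if_pos (by simp [beq_iff_eq.mp hcq])]
          rw [((ih rest hr).1) count none]
          simp [cdDropAfterQuote, hcq]
        · have hcq' : (c == q) = false := by simpa using hcq
          simp only [cdLoopA, Bool.not_true, Bool.and_false, Bool.false_eq_true, if_false,
            Bool.and_true, hcq']
          rw [((ih rest hr).2) count q]
          simp [cdDropAfterQuote, hcq']
-- ===== VERDICT (by name: the statement is the Claim_ definition above) =====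
theorem count_delimiter_outside_quotes_py_spec : Claim_equal_count_delimiter_outside_quotes_py := by
  intro line delim _
  unfold Spec_count_delimiter_outside_quotes_py count_delimiter_outside_quotes_py
    count_delimiter_outside_quotes_py_alt
  have h := (cdLoopA_strip delim line.toList.length line.toList le_rfl).1 0 none
  simpa using h
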